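-- pv_equiv track=rewrite | github.com/fgm670011/SkillFactory | GitHub_0.py | game_core_v1
-- ===== SOURCE A (Python) =====
-- def game_core_v1(number):
--     count = 1  # Начало счетчика попыток
--     predict = 50  # Предсказываем среднее число из диапозона 1-101, для удобства поиска числа.
--     if number % 2 == 0:  # Пишем условия для проверки четности числа
--         while number != predict:  # Если условие срабатывает то прибавляем плюс один к числу попыток
--             count += 1
--             if number > predict:  # Если загаданое число больше предполагамеого то прибавляет 2, так как число четное
--                 predict += 2
--             elif number < predict:  # Иначе вычитаем 2
--                 predict -= 2
--     elif number % 2 != 0:  # Если число нечетное то прибавляем или вычитаем 1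
--         while number != predict:
--             count += 1
--             if number > predict:
--                 predict += 1
--             elif number < predict:
--                 predict -= 1
--     return count  # Возвращаем количество попыток
-- ===== SOURCE B (Python) =====
-- def game_core_v1(number):
--     # Closed form: distance from the starting guess, divided by the parity-dependent step size, plus one.
--     d = abs(number - 50)
--     return 1 + d // 2 if number % 2 == 0 else 1 + d
-- ===== Notes on version B (the rewrite author's own statement) =====
-- stated objective: faster
-- what changed: Replaced the step-by-step guessing loop with a closed-form count: the distance from the starting guess divided by the parity-dependent step size, plus one.
import Mathlib
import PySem

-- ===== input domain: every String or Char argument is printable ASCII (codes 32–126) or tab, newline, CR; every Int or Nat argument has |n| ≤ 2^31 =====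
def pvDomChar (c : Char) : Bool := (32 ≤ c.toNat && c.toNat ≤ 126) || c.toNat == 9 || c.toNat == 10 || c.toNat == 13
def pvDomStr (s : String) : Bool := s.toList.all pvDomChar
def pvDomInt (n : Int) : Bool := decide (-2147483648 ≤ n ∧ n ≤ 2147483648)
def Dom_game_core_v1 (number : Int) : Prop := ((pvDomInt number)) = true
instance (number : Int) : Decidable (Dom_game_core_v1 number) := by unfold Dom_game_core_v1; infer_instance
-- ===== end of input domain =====

-- B replaces A's step-by-step guessing loop with a closed-form count (O(1) vs O(|number-50|)).

-- ===== PORT A =====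
-- small termination facts cited by the ports' `decreasing_by` (kept above the ports on purpose)
theorem pvNatAbsSubLt (d k : Int) (h1 : 0 < k) (h2 : k ≤ d) : (d - k).natAbs < d.natAbs :=
  Int.natAbs_lt_natAbs_of_nonneg_of_lt (sub_nonneg.mpr h2) (sub_lt_self d h1)

theorem pvStep2Lt (n p : Int) (h : 2 ∣ n - p) (hgt : n > p) :
    (n - (p + 2)).natAbs < (n - p).natAbs := by
  have h2 : (2:Int) ≤ n - p := Int.le_of_dvd (sub_pos.mpr hgt) h
  rw [sub_add_eq_sub_sub]
  exact pvNatAbsSubLt _ 2 two_pos h2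

theorem pvStep2Lt' (n p : Int) (h : 2 ∣ n - p) (heq : ¬ n = p) (hgt : ¬ n > p) :
    (n - (p - 2)).natAbs < (n - p).natAbs := by
  have hlt : n < p := lt_of_le_of_ne (not_lt.mp hgt) heq
  have hd : (2:Int) ∣ p - n := by rw [← neg_sub n p]; exact (dvd_neg).mpr h
  have h2 : (2:Int) ≤ p - n := Int.le_of_dvd (sub_pos.mpr hlt) hd
  have e1 : n - (p - 2) = -((p - n) - 2) := by ring
  have e2 : n - p = -(p - n) := (neg_sub p n).symm
  rw [e1, e2, Int.natAbs_neg, Int.natAbs_neg]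
  exact pvNatAbsSubLt _ 2 two_pos h2

theorem pvStep1Lt (n p : Int) (hgt : n > p) :
    (n - (p + 1)).natAbs < (n - p).natAbs := by
  have h1 : (1:Int) ≤ n - p := Int.add_one_le_of_lt (sub_pos.mpr hgt)
  rw [sub_add_eq_sub_sub]
  exact pvNatAbsSubLt _ 1 one_pos h1

theorem pvStep1Lt' (n p : Int) (heq : ¬ n = p) (hgt : ¬ n > p) :
    (n - (p - 1)).natAbs < (n - p).natAbs := by
  have hlt : n < p := lt_of_le_of_ne (not_lt.mp hgt) heq
  have h1 : (1:Int) ≤ p - n := Int.add_one_le_of_lt (sub_pos.mpr hlt)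
  have e1 : n - (p - 1) = -((p - n) - 1) := by ring
  have e2 : n - p = -(p - n) := (neg_sub p n).symm
  rw [e1, e2, Int.natAbs_neg, Int.natAbs_neg]
  exact pvNatAbsSubLt _ 1 one_pos h1

theorem pvDvdStep2 (n p : Int) (h : 2 ∣ n - p) : 2 ∣ n - (p + 2) := by
  rw [sub_add_eq_sub_sub]
  exact dvd_sub h (dvd_refl 2)

theorem pvDvdStep2' (n p : Int) (h : 2 ∣ n - p) : 2 ∣ n - (p - 2) := by
  have e : n - (p - 2) = (n - p) + 2 := by ring
  rw [e]
  exact dvd_add h (dvd_refl 2)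

-- even branch of A's while loop: step ±2; the parity hypothesis (2 ∣ number - predict)
-- holds throughout A's even branch and guarantees termination of the literal loop
def gameLoop2 (number predict count : Int) (h : 2 ∣ (number - predict)) : Int :=
  if number = predict then count
  else if number > predict then
    gameLoop2 number (predict + 2) (count + 1) (pvDvdStep2 number predict h)
  else
    gameLoop2 number (predict - 2) (count + 1) (pvDvdStep2' number predict h)
termination_by (number - predict).natAbs
decreasing_by
  · exact pvStep2Lt number predict h (by assumption)
  · exact pvStep2Lt' number predict h (by assumption) (by assumption)

-- odd branch of A's while loop: step ±1
def gameLoop1 (number predict count : Int) : Int :=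
  if number = predict then count
  else if number > predict then
    gameLoop1 number (predict + 1) (count + 1)
  else
    gameLoop1 number (predict - 1) (count + 1)
termination_by (number - predict).natAbs
decreasing_by
  · exact pvStep1Lt number predict (by assumption)
  · exact pvStep1Lt' number predict (by assumption) (by assumption)

def game_core_v1 (number : Int) : Int :=
  if h : PySem.Int.mod number 2 = 0 then
    gameLoop2 number 50 1
      (dvd_sub ((PySem.Int.mod_eq_zero_iff_dvd number 2).mp h) (Dvd.intro 25 rfl))
  else
    gameLoop1 number 50 1

-- ===== PORT B =====
def game_core_v1_alt (number : Int) : Int :=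
  let d := |number - 50|
  if PySem.Int.mod number 2 = 0 then 1 + PySem.Int.floordiv d 2 else 1 + d

-- ===== PRECONDITION & SPEC =====
def Spec_game_core_v1 (number : Int) (out : Int) : Prop := out = game_core_v1_alt number
instance (number : Int) (out : Int) : Decidable (Spec_game_core_v1 number out) := by unfold Spec_game_core_v1; infer_instance

-- ===== CLAIM (what is proved, stated in full; the proofs are below) =====
def Claim_equal_game_core_v1 : Prop := ∀ (number : Int), Dom_game_core_v1 number → Spec_game_core_v1 number (game_core_v1 number)

-- ===== LEMMAS AND PROOFS =====

theorem gameLoop2_eq (number predict count : Int) (h : 2 ∣ (number - predict)) :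
    gameLoop2 number predict count h = count + ((number - predict).natAbs : Int) / 2 := by
  induction predict, count, h using gameLoop2.induct with
  | case1 c h => simp [gameLoop2]
  | case2 p c h heq hgt ih =>
      rw [gameLoop2, if_neg heq, if_pos hgt, ih]; omega
  | case3 p c h heq hgt ih =>
      rw [gameLoop2, if_neg heq, if_neg hgt, ih]; omega

theorem gameLoop1_eq (number predict count : Int) :
    gameLoop1 number predict count = count + ((number - predict).natAbs : Int) := by
  induction predict, count using gameLoop1.induct number with
  | case1 c => simp [gameLoop1]
  | case2 p c heq hgt ih =>
      rw [gameLoop1, if_neg heq, if_pos hgt, ih]; omega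
  | case3 p c heq hgt ih =>
      rw [gameLoop1, if_neg heq, if_neg hgt, ih]; omega

-- ===== VERDICT (by name: the statement is the Claim_ definition above) =====
theorem game_core_v1_spec : Claim_equal_game_core_v1 := by
  intro number _
  unfold Spec_game_core_v1 game_core_v1 game_core_v1_alt
  by_cases h : PySem.Int.mod number 2 = 0
  · rw [dif_pos h, if_pos h, gameLoop2_eq,
        PySem.Int.floordiv_eq_ediv_of_pos (by norm_num : (0:Int) < 2), Int.abs_eq_natAbs]
  · rw [dif_neg h, if_neg h, gameLoop1_eq, Int.abs_eq_natAbs]
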